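-- pv_equiv track=rewrite | github.com/Da1suKE66/AgentMaskSR | agentsr/controller.py | tile_grid
-- ===== SOURCE A (Python) =====
-- from typing import Any, Dict, Iterable, List, Mapping, Optional, Sequence, Tuple
--
-- def tile_grid(
--     target_size: Tuple[int, int],
--     tile_size: int = 1024,
--     overlap: int = 128,
-- ) -> List[Dict[str, int]]:
--     width, height = target_size
--     stride = max(1, tile_size - overlap)
--     tiles: List[Dict[str, int]] = []
--     for y in range(0, max(1, height - overlap), stride):
--         for x in range(0, max(1, width - overlap), stride):
--             x0 = min(x, max(0, width - tile_size))
--             y0 = min(y, max(0, height - tile_size))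
--             x1 = min(width, x0 + tile_size)
--             y1 = min(height, y0 + tile_size)
--             tile = {"x0": x0, "y0": y0, "x1": x1, "y1": y1}
--             if tile not in tiles:
--                 tiles.append(tile)
--     return tiles
-- ===== SOURCE B (Python) =====
-- def tile_grid(target_size, tile_size=1024, overlap=128):
--     width, height = target_size
--     stride = max(1, tile_size - overlap)
--     max_x0 = max(0, width - tile_size)
--     max_y0 = max(0, height - tile_size)
--     xs, seen_x = [], set()
--     for x in range(0, max(1, width - overlap), stride):
--         x0 = min(x, max_x0)
--         if x0 not in seen_x:
--             seen_x.add(x0)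
--             xs.append(x0)
--     ys, seen_y = [], set()
--     for y in range(0, max(1, height - overlap), stride):
--         y0 = min(y, max_y0)
--         if y0 not in seen_y:
--             seen_y.add(y0)
--             ys.append(y0)
--     return [
--         {"x0": x0, "y0": y0,
--          "x1": min(width, x0 + tile_size),
--          "y1": min(height, y0 + tile_size)}
--         for y0 in ys for x0 in xs
--     ]
-- ===== Notes on version B (the rewrite author's own statement) =====
-- stated objective: alternative
-- what changed: Replaced the nested loop that deduplicates whole tile dicts by scanning the output list with two 1D first-seen passes over the distinct x- and y-origins (each tile is a pure function of (x0, y0)) followed by a Cartesian product.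
import Mathlib
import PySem

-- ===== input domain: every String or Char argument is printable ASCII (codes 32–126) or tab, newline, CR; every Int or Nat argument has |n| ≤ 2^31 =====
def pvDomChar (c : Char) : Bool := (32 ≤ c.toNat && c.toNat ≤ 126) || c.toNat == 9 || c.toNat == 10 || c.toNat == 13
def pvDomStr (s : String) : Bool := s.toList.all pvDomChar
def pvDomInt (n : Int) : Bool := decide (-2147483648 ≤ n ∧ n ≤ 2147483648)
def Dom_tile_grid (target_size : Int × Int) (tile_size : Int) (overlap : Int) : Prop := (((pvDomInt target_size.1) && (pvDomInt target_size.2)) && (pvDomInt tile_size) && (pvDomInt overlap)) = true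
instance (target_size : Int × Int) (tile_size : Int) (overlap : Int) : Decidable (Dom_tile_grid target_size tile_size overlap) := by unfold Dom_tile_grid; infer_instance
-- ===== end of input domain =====

-- B replaces A's nested loop with list-membership dedup over whole tile dicts by two 1D
-- first-seen passes over the x- and y-origins and a Cartesian product (each tile is a
-- pure function of (x0, y0)); same return value in the same order.

-- ===== PORT A =====
def tile_grid (target_size : Int × Int) (tile_size : Int) (overlap : Int) : List (List (String × Int)) :=
  let width := target_size.1
  let height := target_size.2
  let stride := max 1 (tile_size - overlap)
  (PySem.List.pyRange 0 (max 1 (height - overlap)) stride).foldl (fun tiles y =>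
    (PySem.List.pyRange 0 (max 1 (width - overlap)) stride).foldl (fun tiles x =>
      let x0 := min x (max 0 (width - tile_size))
      let y0 := min y (max 0 (height - tile_size))
      let x1 := min width (x0 + tile_size)
      let y1 := min height (y0 + tile_size)
      let tile : List (String × Int) := [("x0", x0), ("y0", y0), ("x1", x1), ("y1", y1)]
      if tile ∈ tiles then tiles else tiles ++ [tile]) tiles) []

-- ===== PORT B =====
def tile_grid_alt (target_size : Int × Int) (tile_size : Int) (overlap : Int) : List (List (String × Int)) :=
  let width := target_size.1
  let height := target_size.2
  let stride := max 1 (tile_size - overlap)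
  let max_x0 := max 0 (width - tile_size)
  let max_y0 := max 0 (height - tile_size)
  let px := (PySem.List.pyRange 0 (max 1 (width - overlap)) stride).foldl
    (fun st x => let x0 := min x max_x0;
      if PySem.Set.contains st.2 x0 then st else (st.1 ++ [x0], PySem.Set.add st.2 x0))
    (([] : List Int), (PySem.Set.empty : PySem.Set Int))
  let xs := px.1
  let py := (PySem.List.pyRange 0 (max 1 (height - overlap)) stride).foldl
    (fun st y => let y0 := min y max_y0;
      if PySem.Set.contains st.2 y0 then st else (st.1 ++ [y0], PySem.Set.add st.2 y0))
    (([] : List Int), (PySem.Set.empty : PySem.Set Int))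
  let ys := py.1
  ys.flatMap (fun y0 => xs.map (fun x0 =>
    [("x0", x0), ("y0", y0), ("x1", min width (x0 + tile_size)), ("y1", min height (y0 + tile_size))]))

-- ===== PRECONDITION & SPEC =====
def Spec_tile_grid (target_size : Int × Int) (tile_size : Int) (overlap : Int) (out : List (List (String × Int))) : Prop := out = tile_grid_alt target_size tile_size overlap
instance (target_size : Int × Int) (tile_size : Int) (overlap : Int) (out : List (List (String × Int))) : Decidable (Spec_tile_grid target_size tile_size overlap out) := by unfold Spec_tile_grid; infer_instance

-- ===== CLAIM (what is proved, stated in full; the proofs are below) =====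
def Claim_equal_tile_grid : Prop := ∀ (target_size : Int × Int) (tile_size : Int) (overlap : Int), Dom_tile_grid target_size tile_size overlap → Spec_tile_grid target_size tile_size overlap (tile_grid target_size tile_size overlap)

-- ===== LEMMAS AND PROOFS =====

/-- First-seen dedup of `xs` relative to the already-seen values `seen`. -/
def dedupFrom (seen : List Int) : List Int → List Int
  | [] => []
  | x :: xs => if x ∈ seen then dedupFrom seen xs else x :: dedupFrom (seen ++ [x]) xs

/-- B's 1D pass: the list component of the (list, seen-set) fold is the first-seen dedup. -/
lemma foldl_dedup_pair (l : List Int) : ∀ (xs : List Int) (seen : PySem.Set Int),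
    (∀ v, PySem.Set.contains seen v = true ↔ v ∈ xs) →
    (l.foldl (fun st v => if PySem.Set.contains st.2 v then st
        else (st.1 ++ [v], PySem.Set.add st.2 v)) (xs, seen)).1
      = xs ++ dedupFrom xs l := by
  induction l with
  | nil => intro xs seen _; simp [dedupFrom]
  | cons v l ih =>
    intro xs seen hinv
    simp only [List.foldl_cons, dedupFrom]
    by_cases hv : PySem.Set.contains seen v = true
    · rw [if_pos hv, if_pos ((hinv v).mp hv)]
      exact ih xs seen hinv
    · rw [if_neg hv, if_neg (fun hc => hv ((hinv v).mpr hc))]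
      rw [ih (xs ++ [v]) (PySem.Set.add seen v) ?_]
      · simp
      · intro u
        have h' : u ∈ seen ↔ u ∈ xs := Iff.trans (PySem.Set.contains_iff _ _).symm (hinv u)
        simp only [PySem.Set.contains_iff, PySem.Set.mem_add, List.mem_append,
          List.mem_singleton, h']

lemma mem_dedupFrom (x : Int) (xs : List Int) : ∀ (seen : List Int),
    x ∈ dedupFrom seen xs ↔ x ∈ xs ∧ x ∉ seen := by
  induction xs with
  | nil => intro seen; simp [dedupFrom]
  | cons a xs ih =>
    intro seen
    simp only [dedupFrom]
    by_cases h : a ∈ seen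
    · simp only [if_pos h, ih, List.mem_cons]
      constructor
      · rintro ⟨hx, hs⟩; exact ⟨Or.inr hx, hs⟩
      · rintro ⟨hx | hx, hs⟩
        · exact absurd (hx ▸ h) hs
        · exact ⟨hx, hs⟩
    · simp only [if_neg h, List.mem_cons, ih, List.mem_append]
      by_cases hxa : x = a
      · simp [hxa, h]
      · simp [hxa]

/-- Inner loop adds nothing when every tile is already present. -/
lemma inner_noop (f : Int → List (String × Int)) (xs : List Int) :
    ∀ (acc : List (List (String × Int))),
    (∀ x ∈ xs, f x ∈ acc) →
    xs.foldl (fun acc x => if f x ∈ acc then acc else acc ++ [f x]) acc = acc := by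
  induction xs with
  | nil => intro acc _; simp
  | cons a xs ih =>
    intro acc h
    simp only [List.foldl_cons, if_pos (h a (List.mem_cons_self ..))]
    exact ih acc (fun x hx => h x (List.mem_cons_of_mem _ hx))

/-- Inner loop: appends exactly the images of the first-seen-deduped fresh values. -/
lemma inner_add (f : Int → List (String × Int))
    (hinj : ∀ a b, f a = f b → a = b) (xs : List Int) :
    ∀ (acc : List (List (String × Int))) (seen : List Int),
    (∀ x, f x ∈ acc ↔ x ∈ seen) →
    xs.foldl (fun acc x => if f x ∈ acc then acc else acc ++ [f x]) acc
      = acc ++ (dedupFrom seen xs).map f := by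
  induction xs with
  | nil => intro acc seen _; simp [dedupFrom]
  | cons a xs ih =>
    intro acc seen hmem
    simp only [List.foldl_cons, dedupFrom]
    by_cases h : a ∈ seen
    · rw [if_pos ((hmem a).mpr h), if_pos h]
      exact ih acc seen hmem
    · rw [if_neg (fun hc => h ((hmem a).mp hc)), if_neg h]
      rw [ih (acc ++ [f a]) (seen ++ [a]) ?_]
      · simp
      · intro x
        simp only [List.mem_append, List.mem_singleton, hmem x]
        constructor
        · rintro (hx | hx)
          · exact Or.inl hx
          · exact Or.inr (hinj x a hx)
        · rintro (hx | hx)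
          · exact Or.inl hx
          · exact Or.inr (hx ▸ rfl)

/-- Outer loop: the whole nested dedup loop is the Cartesian product of the two dedups. -/
lemma outer_prod (tile : Int → Int → List (String × Int))
    (hinj : ∀ a b c d, tile a b = tile c d → a = c ∧ b = d)
    (xs : List Int) (ys : List Int) :
    ∀ (acc : List (List (String × Int))) (seen : List Int),
    (∀ y ∈ seen, ∀ x ∈ xs, tile y x ∈ acc) →
    (∀ t ∈ acc, ∃ y ∈ seen, ∃ x, t = tile y x) →
    ys.foldl (fun acc y => xs.foldl
        (fun acc x => if tile y x ∈ acc then acc else acc ++ [tile y x]) acc) acc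
      = acc ++ (dedupFrom seen ys).flatMap (fun y => (dedupFrom [] xs).map (tile y)) := by
  induction ys with
  | nil => intro acc seen _ _; simp [dedupFrom]
  | cons y ys ih =>
    intro acc seen h1 h2
    simp only [List.foldl_cons, dedupFrom]
    by_cases h : y ∈ seen
    · rw [if_pos h, inner_noop (tile y) xs acc (h1 y h)]
      exact ih acc seen h1 h2
    · rw [if_neg h]
      have hfresh : ∀ x, tile y x ∈ acc ↔ x ∈ ([] : List Int) := by
        intro x
        simp only [List.not_mem_nil, iff_false]
        intro hc
        obtain ⟨y', hy', x', hx'⟩ := h2 _ hc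
        exact h ((hinj y x y' x' hx').1 ▸ hy')
      rw [inner_add (tile y) (fun a b hab => (hinj y a y b hab).2) xs acc [] hfresh]
      rw [ih (acc ++ (dedupFrom [] xs).map (tile y)) (seen ++ [y]) ?_ ?_]
      · simp [List.flatMap_cons]
      · intro y' hy' x hx
        rcases List.mem_append.mp hy' with hy' | hy'
        · exact List.mem_append_left _ (h1 y' hy' x hx)
        · rw [List.mem_singleton.mp hy']
          exact List.mem_append_right _
            (List.mem_map_of_mem ((mem_dedupFrom x xs []).mpr ⟨hx, List.not_mem_nil⟩))
      · intro t ht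
        rcases List.mem_append.mp ht with ht | ht
        · obtain ⟨y', hy', x', hx'⟩ := h2 t ht
          exact ⟨y', List.mem_append_left _ hy', x', hx'⟩
        · obtain ⟨x', _, hx'⟩ := List.mem_map.mp ht
          exact ⟨y, List.mem_append_right _ (List.mem_singleton.mpr rfl), x', hx'.symm⟩

lemma tile_inj (w h ts : Int) :
    ∀ a b c d : Int,
      ([("x0", b), ("y0", a), ("x1", min w (b + ts)), ("y1", min h (a + ts))]
        : List (String × Int))
      = [("x0", d), ("y0", c), ("x1", min w (d + ts)), ("y1", min h (c + ts))]
      → a = c ∧ b = d := by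
  intro a b c d hcd
  simp only [List.cons.injEq, Prod.mk.injEq] at hcd
  exact ⟨hcd.2.1.2, hcd.1.2⟩

-- ===== VERDICT (by name: the statement is the Claim_ definition above) =====
theorem tile_grid_spec : Claim_equal_tile_grid := by
  intro ts tile_size overlap _
  obtain ⟨w, h⟩ := ts
  unfold Spec_tile_grid tile_grid tile_grid_alt
  simp only []
  set fX : Int → Int := fun x => min x (max 0 (w - tile_size)) with hfX
  set fY : Int → Int := fun y => min y (max 0 (h - tile_size)) with hfY
  set tile : Int → Int → List (String × Int) := fun y0 x0 =>
    [("x0", x0), ("y0", y0), ("x1", min w (x0 + tile_size)), ("y1", min h (y0 + tile_size))]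
    with htile
  set xr := PySem.List.pyRange 0 (max 1 (w - overlap)) (max 1 (tile_size - overlap)) with hxr
  set yr := PySem.List.pyRange 0 (max 1 (h - overlap)) (max 1 (tile_size - overlap)) with hyr
  have hA : yr.foldl (fun tiles y => xr.foldl (fun tiles x =>
        if tile (fY y) (fX x) ∈ tiles then tiles else tiles ++ [tile (fY y) (fX x)]) tiles) []
      = (yr.map fY).foldl (fun tiles y0 => (xr.map fX).foldl
        (fun tiles x0 => if tile y0 x0 ∈ tiles then tiles else tiles ++ [tile y0 x0]) tiles) [] := by
    rw [List.foldl_map]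
    congr 1
    funext tiles y
    rw [List.foldl_map]
  have hstep : ∀ (f : Int → Int) (l : List Int),
      (l.foldl (fun st v => if PySem.Set.contains st.2 (f v) then st
          else (st.1 ++ [f v], PySem.Set.add st.2 (f v)))
        (([] : List Int), (PySem.Set.empty : PySem.Set Int))).1
        = dedupFrom [] (l.map f) := by
    intro f l
    rw [List.foldl_map (f := f) (l := l)
        (g := fun st v => if PySem.Set.contains st.2 v then st
          else (st.1 ++ [v], PySem.Set.add st.2 v))
        (init := (([] : List Int), (PySem.Set.empty : PySem.Set Int))) |>.symm]
    rw [foldl_dedup_pair (l.map f) [] PySem.Set.empty (by simp [PySem.Set.empty, PySem.Set.contains]),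
      List.nil_append]
  have hBx := hstep fX xr
  have hBy := hstep fY yr
  show yr.foldl _ [] = _
  rw [hA, hBx, hBy]
  have hmain := outer_prod tile (tile_inj w h tile_size) (xr.map fX) (yr.map fY) [] []
    (by intro y hy; simp at hy) (by intro t ht; simp at ht)
  rw [List.nil_append] at hmain
  exact hmain
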